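-- pv_equiv track=rewrite | github.com/Konstantln/amis_python71 | km71/Kostiantyn_Sakhniuk/12/task3.py | func
-- ===== SOURCE A (Python) =====
-- def func(sp, ch, lh, i, k, pr, big, biggest):
--     ch = ""
--     if sp[i] != " " and i > k:
--         k = i
--         while sp[k] != " ":
--             ch += sp[k]
--             k += 1
--             if k == len(sp):
--                 break
--         if big == "":
--             big += ch
--             lh = ch
--         elif ch == lh:
--             big += ch
--         elif ch != lh and len(big) > len(biggest):
--             biggest = big
--             big = ch
--             lh = ch
--         elif ch != lh:
--             big = ch
--             lh = ch
--     i += 1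
--     if i == len(sp) and len(big) > len(biggest):
--         biggest = big
--         return biggest
--     elif i == len(sp):
--         return biggest
--     biggest = func(sp, ch, lh, i, k, pr, big, biggest)
--     return biggest
-- ===== SOURCE B (Python) =====
-- def _words(sp, i, k):
--     # pass 1: the sequence of words the scan visits, honouring the i > k skip rule
--     words = []
--     n = len(sp)
--     while True:
--         if sp[i] != " " and i > k:
--             w = ""
--             k = i
--             while sp[k] != " ":
--                 w += sp[k]
--                 k += 1
--                 if k == n:
--                     break
--             words.append(w)
--         i += 1
--         if i == n:
--             return words
--
--
-- def func(sp, ch, lh, i, k, pr, big, biggest):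
--     # pass 2: fold the run-bookkeeping over the word sequence
--     for w in _words(sp, i, k):
--         if big == "":
--             lh, big = w, w
--         elif w == lh:
--             big += w
--         else:
--             if len(big) > len(biggest):
--                 biggest = big
--             lh, big = w, w
--     return big if len(big) > len(biggest) else biggest
-- ===== Notes on version B (the rewrite author's own statement) =====
-- stated objective: alternative
-- what changed: Replaced A's self-recursion that interleaves character scanning with run bookkeeping by two staged passes: a first pass extracts the sequence of words (with A's i>k skip rule), then a fold over that word list does the big/lh/biggest bookkeeping, followed by the final comparison; the dead ch/pr state is dropped.
import Mathlib
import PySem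

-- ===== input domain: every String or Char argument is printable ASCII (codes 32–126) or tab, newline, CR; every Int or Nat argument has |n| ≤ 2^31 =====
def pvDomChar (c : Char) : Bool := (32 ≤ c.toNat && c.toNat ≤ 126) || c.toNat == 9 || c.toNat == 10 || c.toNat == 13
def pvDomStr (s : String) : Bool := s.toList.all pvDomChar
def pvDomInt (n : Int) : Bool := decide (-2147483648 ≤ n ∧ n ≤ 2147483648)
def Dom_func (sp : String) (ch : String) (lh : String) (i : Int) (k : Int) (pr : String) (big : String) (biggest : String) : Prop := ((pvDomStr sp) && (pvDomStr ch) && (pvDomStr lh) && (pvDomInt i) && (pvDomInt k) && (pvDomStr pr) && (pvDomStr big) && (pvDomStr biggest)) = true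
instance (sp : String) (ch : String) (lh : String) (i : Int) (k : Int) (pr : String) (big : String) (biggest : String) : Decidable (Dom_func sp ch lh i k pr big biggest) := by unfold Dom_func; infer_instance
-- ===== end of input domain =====

-- B replaces A's interleaved self-recursion by two staged passes (extract the word
-- sequence, then fold the run bookkeeping over it) and drops the dead ch/pr state:
-- objective 'alternative'. A mutates nothing; the equivalence is about the return value.
-- Both ports use a fuel counter only as a structural-termination guard; with the fuel
-- they are called with it never runs out on inputs admitted by Pre_func.

-- ===== PORT A =====
-- inner 'while sp[k] != " "' loop of A, carrying (ch, k); none from pyGet? = IndexError (excluded by Pre_)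
def funcScanA (sp : List Char) (fuel : Nat) (k : Int) (ch : List Char) : List Char × Int :=
  match fuel with
  | 0 => (ch, k)                 -- fuel exhausted (never happens at the fuel func supplies)
  | fuel + 1 =>
    match PySem.List.pyGet? sp k with
    | none => (ch, k)            -- IndexError (unreachable under Pre_func)
    | some c =>
      if c ≠ ' ' then            -- ch += sp[k]; k += 1; if k == len(sp): break
        if k + 1 = (sp.length : Int) then (ch ++ [c], k + 1)
        else funcScanA sp fuel (k + 1) (ch ++ [c])
      else (ch, k)

-- the body of A, recursing exactly as the Python does; the mutable locals
-- (ch, k, lh, big, biggest) are carried as the tuple st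
def funcA (sp : List Char) (fuel : Nat) (ch lh : List Char) (i k : Int) (pr big biggest : List Char) : List Char :=
  match fuel with
  | 0 => []                      -- fuel exhausted (never happens at the fuel func supplies)
  | fuel + 1 =>
    -- ch = ""
    match PySem.List.pyGet? sp i with
    | none => []                 -- IndexError (unreachable under Pre_func)
    | some c =>
      let st : List Char × Int × List Char × List Char × List Char :=
        if c ≠ ' ' ∧ i > k then        -- k = i; the while loop; then the big/lh/biggest branches
          let wk := funcScanA sp (2 * sp.length + 2) i []
          if big = [] then (wk.1, wk.2, wk.1, big ++ wk.1, biggest)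
          else if wk.1 = lh then (wk.1, wk.2, lh, big ++ wk.1, biggest)
          else if wk.1 ≠ lh ∧ big.length > biggest.length then (wk.1, wk.2, wk.1, wk.1, big)
          else if wk.1 ≠ lh then (wk.1, wk.2, wk.1, wk.1, biggest)
          else (wk.1, wk.2, lh, big, biggest)
        else ([], k, lh, big, biggest)
      -- i += 1; return / recurse
      if i + 1 = (sp.length : Int) then
        if st.2.2.2.1.length > st.2.2.2.2.length then st.2.2.2.1 else st.2.2.2.2
      else funcA sp fuel st.1 st.2.2.1 (i + 1) st.2.1 pr st.2.2.2.1 st.2.2.2.2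

def func (sp : String) (ch : String) (lh : String) (i : Int) (k : Int) (pr : String) (big : String) (biggest : String) : String :=
  String.ofList (funcA sp.toList (2 * sp.toList.length + 2) ch.toList lh.toList i k pr.toList big.toList biggest.toList)

-- ===== PORT B =====
-- B, pass 1 inner scan: the word starting at position k, built front-to-back, with its end position
def funcScanB (sp : List Char) (fuel : Nat) (k : Int) : List Char × Int :=
  match fuel with
  | 0 => ([], k)                 -- fuel exhausted (never happens at the fuel func_alt supplies)
  | fuel + 1 =>
    match PySem.List.pyGet? sp k with
    | none => ([], k)            -- IndexError (unreachable under Pre_func)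
    | some c =>
      if c = ' ' then ([], k)
      else if k + 1 = (sp.length : Int) then ([c], k + 1)
      else (c :: (funcScanB sp fuel (k + 1)).1, (funcScanB sp fuel (k + 1)).2)

-- B, pass 1: the list of words visited, honouring the i > k skip rule
def funcWords (sp : List Char) (fuel : Nat) (i k : Int) : List (List Char) :=
  match fuel with
  | 0 => []                      -- fuel exhausted (never happens at the fuel func_alt supplies)
  | fuel + 1 =>
    match PySem.List.pyGet? sp i with
    | none => []                 -- IndexError (unreachable under Pre_func)
    | some c =>
      if c ≠ ' ' ∧ i > k then
        let wk := funcScanB sp (2 * sp.length + 2) i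
        if i + 1 = (sp.length : Int) then [wk.1]
        else wk.1 :: funcWords sp fuel (i + 1) wk.2
      else
        if i + 1 = (sp.length : Int) then []
        else funcWords sp fuel (i + 1) k

-- B, pass 2: one bookkeeping step of the fold, state (lh, big, biggest)
def funcStep (st : List Char × List Char × List Char) (w : List Char) : List Char × List Char × List Char :=
  if st.2.1 = [] then (w, w, st.2.2)
  else if w = st.1 then (st.1, st.2.1 ++ w, st.2.2)
  else if st.2.1.length > st.2.2.length then (w, w, st.2.1)
  else (w, w, st.2.2)

def func_alt (sp : String) (ch : String) (lh : String) (i : Int) (k : Int) (pr : String) (big : String) (biggest : String) : String :=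
  let st := (funcWords sp.toList (2 * sp.toList.length + 2) i k).foldl funcStep (lh.toList, big.toList, biggest.toList)
  String.ofList (if st.2.1.length > st.2.2.length then st.2.1 else st.2.2)

-- ===== PRECONDITION & SPEC =====
-- Pre_func: exactly the inputs on which the Python A returns (sp[i] raises IndexError iff i is out of range; with -len ≤ i the whole run then stays in range)
def Pre_func (sp : String) (ch : String) (lh : String) (i : Int) (k : Int) (pr : String) (big : String) (biggest : String) : Prop :=
  -(sp.toList.length : Int) ≤ i ∧ i < (sp.toList.length : Int)
instance (sp : String) (ch : String) (lh : String) (i : Int) (k : Int) (pr : String) (big : String) (biggest : String) : Decidable (Pre_func sp ch lh i k pr big biggest) := by unfold Pre_func; infer_instance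

def pvWitness_func : String × String × String × Int × Int × String × String × String :=
  ("hi hi yo", "", "", 0, -1, "", "", "")

def Spec_func (sp : String) (ch : String) (lh : String) (i : Int) (k : Int) (pr : String) (big : String) (biggest : String) (out : String) : Prop := out = func_alt sp ch lh i k pr big biggest
instance (sp : String) (ch : String) (lh : String) (i : Int) (k : Int) (pr : String) (big : String) (biggest : String) (out : String) : Decidable (Spec_func sp ch lh i k pr big biggest out) := by unfold Spec_func; infer_instance

-- ===== CLAIM (what is proved, stated in full; the proofs are below) =====
def Claim_equal_func : Prop := ∀ (sp : String) (ch : String) (lh : String) (i : Int) (k : Int) (pr : String) (big : String) (biggest : String), Dom_func sp ch lh i k pr big biggest → Pre_func sp ch lh i k pr big biggest → Spec_func sp ch lh i k pr big biggest (func sp ch lh i k pr big biggest)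

-- ===== LEMMAS AND PROOFS =====

theorem scan_eq (sp : List Char) (fuel : Nat) (k : Int) (ch : List Char) :
    funcScanA sp fuel k ch = (ch ++ (funcScanB sp fuel k).1, (funcScanB sp fuel k).2) := by
  induction fuel generalizing k ch with
  | zero => simp [funcScanA, funcScanB]
  | succ fuel ih =>
    simp only [funcScanA, funcScanB]
    cases PySem.List.pyGet? sp k with
    | none => simp
    | some c =>
      by_cases hc : c = ' '
      · simp [hc]
      · by_cases hl : k + 1 = (sp.length : Int)
        · simp [hc, hl]
        · simp [hc, hl, ih]

-- A's if/elif chain on (ch, k, lh, big, biggest): its (lh, big, biggest) part is one funcStep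
theorem upd22 (lh big biggest w : List Char) (k' : Int) :
    ((if big = [] then (w, k', w, big ++ w, biggest)
      else if w = lh then (w, k', lh, big ++ w, biggest)
      else if w ≠ lh ∧ big.length > biggest.length then (w, k', w, w, big)
      else if w ≠ lh then (w, k', w, w, biggest)
      else (w, k', lh, big, biggest) :
        List Char × Int × List Char × List Char × List Char)).2.2
      = funcStep (lh, big, biggest) w := by
  simp only [funcStep]
  split_ifs <;> simp_all

theorem upd21 (lh big biggest w : List Char) (k' : Int) :
    ((if big = [] then (w, k', w, big ++ w, biggest)
      else if w = lh then (w, k', lh, big ++ w, biggest)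
      else if w ≠ lh ∧ big.length > biggest.length then (w, k', w, w, big)
      else if w ≠ lh then (w, k', w, w, biggest)
      else (w, k', lh, big, biggest) :
        List Char × Int × List Char × List Char × List Char)).2.1
      = k' := by
  split_ifs <;> rfl

theorem loop_eq (sp : List Char) (fuel : Nat) (ch lh : List Char) (i k : Int) (pr big biggest : List Char) :
    -(sp.length : Int) ≤ i → i < (sp.length : Int) → (sp.length : Int) - i ≤ (fuel : Int) →
    funcA sp fuel ch lh i k pr big biggest =
      (match (funcWords sp fuel i k).foldl funcStep (lh, big, biggest) with
       | (_, big, biggest) => if big.length > biggest.length then big else biggest) := by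
  induction fuel generalizing ch lh i k big biggest with
  | zero =>
    intro h1 h2 h3
    simp at h3
    omega
  | succ fuel ih =>
    intro h1 h2 h3
    simp only [funcA, funcWords]
    cases hE : PySem.List.pyGet? sp i with
    | none =>
      exfalso
      rw [PySem.List.pyGet?_eq_none_iff] at hE
      simp [PySem.Raise.InRange] at hE
      omega
    | some c =>
      by_cases hc : c ≠ ' ' ∧ i > k
      · simp only [if_pos hc, scan_eq, List.nil_append]
        have e := upd22 lh big biggest (funcScanB sp (2 * sp.length + 2) i).1 (funcScanB sp (2 * sp.length + 2) i).2
        by_cases hl : i + 1 = (sp.length : Int)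
        · simp only [if_pos hl, List.foldl_cons, List.foldl_nil]
          rw [e]
        · simp only [if_neg hl, List.foldl_cons]
          rw [ih _ _ _ _ _ _ (by omega) (by omega) (by push_cast at h3 ⊢; omega)]
          rw [upd21]
          have e' : ∀ x : List Char × Int × List Char × List Char × List Char,
              x.2.2 = funcStep (lh, big, biggest) (funcScanB sp (2 * sp.length + 2) i).1 →
              (x.2.2.1, x.2.2.2.1, x.2.2.2.2) = funcStep (lh, big, biggest) (funcScanB sp (2 * sp.length + 2) i).1 := by
            intro x hx
            rw [← hx]
          rw [e' _ e]
      · simp only [if_neg hc]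
        by_cases hl : i + 1 = (sp.length : Int)
        · simp only [if_pos hl, List.foldl_nil]
        · simp only [if_neg hl]
          exact ih _ _ _ _ _ _ (by omega) (by omega) (by push_cast at h3 ⊢; omega)

theorem witness_ok : Pre_func (pvWitness_func.1) (pvWitness_func.2.1) (pvWitness_func.2.2.1) (pvWitness_func.2.2.2.1) (pvWitness_func.2.2.2.2.1) (pvWitness_func.2.2.2.2.2.1) (pvWitness_func.2.2.2.2.2.2.1) (pvWitness_func.2.2.2.2.2.2.2) := by
  decide

-- ===== VERDICT (by name: the statement is the Claim_ definition above) =====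
theorem func_spec : Claim_equal_func := by
  intro sp ch lh i k pr big biggest _ hpre
  unfold Spec_func func func_alt
  rw [loop_eq sp.toList _ ch.toList lh.toList i k pr.toList big.toList biggest.toList hpre.1 hpre.2 (by have h1 := hpre.1; have h2 := hpre.2; push_cast at h1 h2 ⊢; omega)]
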